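-- pv_equiv track=rewrite | github.com/reportmate/terraform-azurerm-reportmate | api/processors/applications.py | _categorize_application
-- ===== SOURCE A (Python) =====
-- def _categorize_application(app_name: str) -> str:
--     """Categorize application based on name"""
--     if not app_name:
--         return 'Unknown'
--
--     app_name_lower = app_name.lower()
--
--     # Development tools
--     if any(keyword in app_name_lower for keyword in ['visual studio', 'eclipse', 'intellij', 'code', 'git', 'docker', 'python', 'node']):
--         return 'Development'
--
--     # Office and productivity
--     if any(keyword in app_name_lower for keyword in ['office', 'word', 'excel', 'powerpoint', 'outlook', 'teams', 'slack', 'zoom']):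
--         return 'Productivity'
--
--     # Web browsers
--     if any(keyword in app_name_lower for keyword in ['chrome', 'firefox', 'edge', 'safari', 'browser']):
--         return 'Browser'
--
--     # Media and graphics
--     if any(keyword in app_name_lower for keyword in ['photoshop', 'illustrator', 'vlc', 'media', 'video', 'audio', 'player']):
--         return 'Media'
--
--     # Security
--     if any(keyword in app_name_lower for keyword in ['antivirus', 'defender', 'security', 'firewall', 'vpn']):
--         return 'Security'
--
--     # System utilities
--     if any(keyword in app_name_lower for keyword in ['driver', 'utility', 'update', 'runtime', 'redistributable', 'framework']):
--         return 'System'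
--
--     # Games
--     if any(keyword in app_name_lower for keyword in ['game', 'steam', 'origin', 'uplay']):
--         return 'Games'
--
--     return 'Other'
-- ===== SOURCE B (Python) =====
-- # Inverted lookup: instead of testing each keyword against the name, scan every
-- # substring of the (lowercased) name against a keyword -> (priority, category)
-- # hash table, keeping the hit with the smallest priority.
-- _KW = {
--     'visual studio': (0, 'Development'), 'eclipse': (0, 'Development'),
--     'intellij': (0, 'Development'), 'code': (0, 'Development'),
--     'git': (0, 'Development'), 'docker': (0, 'Development'),
--     'python': (0, 'Development'), 'node': (0, 'Development'),
--     'office': (1, 'Productivity'), 'word': (1, 'Productivity'),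
--     'excel': (1, 'Productivity'), 'powerpoint': (1, 'Productivity'),
--     'outlook': (1, 'Productivity'), 'teams': (1, 'Productivity'),
--     'slack': (1, 'Productivity'), 'zoom': (1, 'Productivity'),
--     'chrome': (2, 'Browser'), 'firefox': (2, 'Browser'),
--     'edge': (2, 'Browser'), 'safari': (2, 'Browser'), 'browser': (2, 'Browser'),
--     'photoshop': (3, 'Media'), 'illustrator': (3, 'Media'), 'vlc': (3, 'Media'),
--     'media': (3, 'Media'), 'video': (3, 'Media'), 'audio': (3, 'Media'),
--     'player': (3, 'Media'),
--     'antivirus': (4, 'Security'), 'defender': (4, 'Security'),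
--     'security': (4, 'Security'), 'firewall': (4, 'Security'),
--     'vpn': (4, 'Security'),
--     'driver': (5, 'System'), 'utility': (5, 'System'), 'update': (5, 'System'),
--     'runtime': (5, 'System'), 'redistributable': (5, 'System'),
--     'framework': (5, 'System'),
--     'game': (6, 'Games'), 'steam': (6, 'Games'), 'origin': (6, 'Games'),
--     'uplay': (6, 'Games'),
-- }
-- _LENGTHS = [3, 4, 5, 6, 7, 8, 9, 10, 11, 13, 15]  # the distinct keyword lengths
--
--
-- def _categorize_application(app_name: str) -> str:
--     if not app_name:
--         return 'Unknown'
--     low = app_name.lower()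
--     best = None
--     for i in range(len(low)):
--         for L in _LENGTHS:
--             hit = _KW.get(low[i:i+L])
--             if hit is not None and (best is None or hit[0] < best[0]):
--                 best = hit
--     return best[1] if best is not None else 'Other'
-- ===== Notes on version B (the rewrite author's own statement) =====
-- stated objective: alternative
-- what changed: Inverts the search: instead of testing each of the 43 keywords for membership in the name per category branch, B scans every substring of the lowercased name (each start index x each distinct keyword length) against a keyword->(priority,category) hash table and returns the category of the minimum-priority hit, falling back as A does when nothing matches.
import Mathlib
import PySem

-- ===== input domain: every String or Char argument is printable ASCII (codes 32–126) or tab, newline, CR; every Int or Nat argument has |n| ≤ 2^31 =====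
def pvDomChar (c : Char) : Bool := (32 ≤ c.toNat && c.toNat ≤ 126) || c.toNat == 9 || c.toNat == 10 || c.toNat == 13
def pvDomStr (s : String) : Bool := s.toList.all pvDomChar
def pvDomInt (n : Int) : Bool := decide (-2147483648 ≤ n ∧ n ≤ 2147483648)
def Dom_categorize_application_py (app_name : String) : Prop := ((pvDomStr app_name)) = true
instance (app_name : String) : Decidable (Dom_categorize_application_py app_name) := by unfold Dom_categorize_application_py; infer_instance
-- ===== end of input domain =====

-- B inverts the search: A tests each of 43 keywords for membership in the name branch by branch; B scans every substring of the lowercased name (start index x distinct keyword length) against a keyword->(priority,category) dict and returns the minimum-priority hit's category ('alternative', same cost class).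


-- ===== PORT A =====
def categorize_application_py (app_name : String) : String :=
  if app_name = "" then "Unknown"
  else
    let app_name_lower := PySem.Str.lower app_name
    if ["visual studio", "eclipse", "intellij", "code", "git", "docker", "python", "node"].any
        (fun keyword => PySem.Str.isIn keyword app_name_lower) then "Development"
    else if ["office", "word", "excel", "powerpoint", "outlook", "teams", "slack", "zoom"].any
        (fun keyword => PySem.Str.isIn keyword app_name_lower) then "Productivity"
    else if ["chrome", "firefox", "edge", "safari", "browser"].any
        (fun keyword => PySem.Str.isIn keyword app_name_lower) then "Browser"
    else if ["photoshop", "illustrator", "vlc", "media", "video", "audio", "player"].any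
        (fun keyword => PySem.Str.isIn keyword app_name_lower) then "Media"
    else if ["antivirus", "defender", "security", "firewall", "vpn"].any
        (fun keyword => PySem.Str.isIn keyword app_name_lower) then "Security"
    else if ["driver", "utility", "update", "runtime", "redistributable", "framework"].any
        (fun keyword => PySem.Str.isIn keyword app_name_lower) then "System"
    else if ["game", "steam", "origin", "uplay"].any
        (fun keyword => PySem.Str.isIn keyword app_name_lower) then "Games"
    else "Other"

-- ===== PORT B =====
-- _KW : keyword -> (priority, category), dict-literal insertion order as in Source B
def pvKWitems : List (String × Int × String) :=
  [("visual studio", (0, "Development")), ("eclipse", (0, "Development")),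
   ("intellij", (0, "Development")), ("code", (0, "Development")),
   ("git", (0, "Development")), ("docker", (0, "Development")),
   ("python", (0, "Development")), ("node", (0, "Development")),
   ("office", (1, "Productivity")), ("word", (1, "Productivity")),
   ("excel", (1, "Productivity")), ("powerpoint", (1, "Productivity")),
   ("outlook", (1, "Productivity")), ("teams", (1, "Productivity")),
   ("slack", (1, "Productivity")), ("zoom", (1, "Productivity")),
   ("chrome", (2, "Browser")), ("firefox", (2, "Browser")),
   ("edge", (2, "Browser")), ("safari", (2, "Browser")), ("browser", (2, "Browser")),
   ("photoshop", (3, "Media")), ("illustrator", (3, "Media")), ("vlc", (3, "Media")),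
   ("media", (3, "Media")), ("video", (3, "Media")), ("audio", (3, "Media")),
   ("player", (3, "Media")),
   ("antivirus", (4, "Security")), ("defender", (4, "Security")),
   ("security", (4, "Security")), ("firewall", (4, "Security")),
   ("vpn", (4, "Security")),
   ("driver", (5, "System")), ("utility", (5, "System")), ("update", (5, "System")),
   ("runtime", (5, "System")), ("redistributable", (5, "System")),
   ("framework", (5, "System")),
   ("game", (6, "Games")), ("steam", (6, "Games")), ("origin", (6, "Games")),
   ("uplay", (6, "Games"))]

def pvKW : PySem.Dict String (Int × String) := { items := pvKWitems }

def pvLengths : List Int := [3, 4, 5, 6, 7, 8, 9, 10, 11, 13, 15]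

def categorize_application_py_alt (app_name : String) : String :=
  if app_name = "" then "Unknown"
  else
    let low := PySem.Str.lower app_name
    let best := (PySem.List.pyRange 0 (PySem.Str.len low) 1).foldl (fun best i =>
      pvLengths.foldl (fun best L =>
        match pvKW.get? (PySem.Str.slice low (some i) (some (i + L))) with
        | some hit => match best with
          | none => some hit
          | some b => if hit.1 < b.1 then some hit else some b
        | none => best) best) (none : Option (Int × String))
    match best with
    | some b => b.2
    | none => "Other"

-- ===== PRECONDITION & SPEC =====
def Spec_categorize_application_py (app_name : String) (out : String) : Prop := out = categorize_application_py_alt app_name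
instance (app_name : String) (out : String) : Decidable (Spec_categorize_application_py app_name out) := by unfold Spec_categorize_application_py; infer_instance

-- ===== CLAIM (what is proved, stated in full; the proofs are below) =====
def Claim_equal_categorize_application_py : Prop := ∀ (app_name : String), Dom_categorize_application_py app_name → Spec_categorize_application_py app_name (categorize_application_py app_name)

-- ===== LEMMAS AND PROOFS =====

-- left-biased minimum (by priority) on optional hits: the combining step of B's loops
def pvM (a b : Option (Int × String)) : Option (Int × String) :=
  match a, b with
  | none, b => b
  | some a', none => some a'
  | some a', some b' => if b'.1 < a'.1 then some b' else some a'

-- the hit at one (start index, length) pair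
def pvG (low : String) (p : Int × Int) : Option (Int × String) :=
  pvKW.get? (PySem.Str.slice low (some p.1) (some (p.1 + p.2)))

def pvPairs (low : String) : List (Int × Int) :=
  (PySem.List.pyRange 0 (PySem.Str.len low) 1).flatMap (fun i => pvLengths.map (fun L => (i, L)))

def pvHits (low : String) : List (Option (Int × String)) := (pvPairs low).map (pvG low)

-- category name and keyword list of priority j (A's branches in order)
def pvCat (j : Int) : String :=
  if j = 0 then "Development" else if j = 1 then "Productivity" else if j = 2 then "Browser"
  else if j = 3 then "Media" else if j = 4 then "Security" else if j = 5 then "System" else "Games"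

def pvKws (j : Int) : List String :=
  if j = 0 then ["visual studio", "eclipse", "intellij", "code", "git", "docker", "python", "node"]
  else if j = 1 then ["office", "word", "excel", "powerpoint", "outlook", "teams", "slack", "zoom"]
  else if j = 2 then ["chrome", "firefox", "edge", "safari", "browser"]
  else if j = 3 then ["photoshop", "illustrator", "vlc", "media", "video", "audio", "player"]
  else if j = 4 then ["antivirus", "defender", "security", "firewall", "vpn"]
  else if j = 5 then ["driver", "utility", "update", "runtime", "redistributable", "framework"]
  else ["game", "steam", "origin", "uplay"]

def pvFlag (low : String) (j : Int) : Bool := (pvKws j).any (fun k => PySem.Str.isIn k low)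

theorem pvM_none_right (a : Option (Int × String)) : pvM a none = a := by cases a <;> rfl

theorem pvM_eq_none_iff (a b : Option (Int × String)) :
    pvM a b = none ↔ a = none ∧ b = none := by
  rcases a with _ | a <;> rcases b with _ | b <;> simp only [pvM] <;> try simp
  split_ifs <;> simp

theorem pvM_assoc (a b c : Option (Int × String)) : pvM (pvM a b) c = pvM a (pvM b c) := by
  rcases a with _ | a <;> rcases b with _ | b <;> rcases c with _ | c <;> try rfl
  · simp only [pvM]; split_ifs <;> rfl
  · by_cases h1 : b.1 < a.1 <;> by_cases h2 : c.1 < b.1 <;> by_cases h3 : c.1 < a.1 <;>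
      simp [pvM, h1, h2, h3] <;> omega

theorem pv_foldl_init (hs : List (Option (Int × String))) : ∀ init,
    hs.foldl pvM init = pvM init (hs.foldl pvM none) := by
  induction hs with
  | nil => intro init; simp [pvM_none_right]
  | cons h t ih =>
      intro init
      simp only [List.foldl_cons]
      rw [ih (pvM init h), ih (pvM none h), ← pvM_assoc]
      rfl

theorem pv_foldl_cons (h : Option (Int × String)) (t : List (Option (Int × String))) :
    (h :: t).foldl pvM none = pvM h (t.foldl pvM none) := by
  simp only [List.foldl_cons]; rw [pv_foldl_init]; rfl

theorem pv_fold_none_iff (hs : List (Option (Int × String))) :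
    hs.foldl pvM none = none ↔ ∀ h ∈ hs, h = none := by
  induction hs with
  | nil => simp
  | cons h t ih => rw [pv_foldl_cons, pvM_eq_none_iff, ih]; simp

theorem pv_fold_mem (hs : List (Option (Int × String))) : ∀ v : Int × String,
    hs.foldl pvM none = some v → some v ∈ hs := by
  induction hs with
  | nil => intro v he; simp [List.foldl_nil] at he
  | cons h t ih =>
      intro v he
      rw [pv_foldl_cons] at he
      rcases h with _ | a
      · exact List.mem_cons_of_mem _ (ih v he)
      · rcases ht : List.foldl pvM none t with _ | b <;> rw [ht] at he <;> simp only [pvM] at he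
        · exact he ▸ List.mem_cons_self
        · split at he <;> obtain rfl := Option.some.inj he
          · exact List.mem_cons_of_mem _ (ih b ht)
          · exact List.mem_cons_self

theorem pv_fold_min (hs : List (Option (Int × String))) : ∀ v : Int × String,
    hs.foldl pvM none = some v → ∀ w : Int × String, some w ∈ hs → v.1 ≤ w.1 := by
  induction hs with
  | nil => intro v he; simp [List.foldl_nil] at he
  | cons h t ih =>
      intro v he w hw
      rw [pv_foldl_cons] at he
      rcases List.mem_cons.mp hw with hwh | hwt
      · rcases h with _ | a
        · simp at hwh
        · obtain rfl := Option.some.inj hwh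
          rcases ht : List.foldl pvM none t with _ | b <;> rw [ht] at he <;> simp only [pvM] at he
          · obtain rfl := Option.some.inj he; exact le_refl _
          · split at he <;> obtain rfl := Option.some.inj he
            · omega
            · exact le_refl _
      · rcases h with _ | a
        · exact ih v he w hwt
        · rcases ht : List.foldl pvM none t with _ | b <;> rw [ht] at he <;> simp only [pvM] at he
          · have := (pv_fold_none_iff t).mp ht _ hwt; simp at this
          · have hb := ih b ht w hwt
            split at he <;> obtain rfl := Option.some.inj he <;> omega

theorem pv_fold_exists (hs : List (Option (Int × String))) (w : Int × String)
    (hw : some w ∈ hs) : ∃ v, hs.foldl pvM none = some v ∧ v.1 ≤ w.1 := by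
  rcases he : hs.foldl pvM none with _ | v
  · exact absurd ((pv_fold_none_iff hs).mp he _ hw) (by simp)
  · exact ⟨v, rfl, pv_fold_min hs v he w hw⟩

theorem pv_get?_mem : ∀ (l : List (String × Int × String)) (s : String) (v : Int × String),
    (PySem.Dict.mk l).get? s = some v → (s, v) ∈ l := by
  intro l
  induction l with
  | nil => intro s v h; simp [PySem.Dict.get?] at h
  | cons e t ih =>
      intro s v h
      rcases e with ⟨k, w⟩
      rw [PySem.Dict.get?_mk_cons] at h
      split at h
      · cases h
        have : k = s := by simpa using (by assumption : (k == s) = true)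
        subst this; exact List.mem_cons_self
      · exact List.mem_cons_of_mem _ (ih s v h)

theorem pvLengths_pos : ∀ L ∈ pvLengths, 0 < L := by decide

-- every dict entry: priority in [0,6], category = pvCat, keyword listed under its priority,
-- keyword nonempty, keyword length in pvLengths
theorem pv_entries_fact : ∀ e ∈ pvKWitems,
    (0 ≤ e.2.1 ∧ e.2.1 ≤ 6) ∧ e.2.2 = pvCat e.2.1 ∧ e.1 ∈ pvKws e.2.1 ∧
    e.1.toList ≠ [] ∧ ((e.1.toList.length : Int)) ∈ pvLengths := by decide

theorem pv_kws_fact : ∀ j ∈ ([0, 1, 2, 3, 4, 5, 6] : List Int), ∀ k ∈ pvKws j,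
    pvKW.get? k = some (j, pvCat j) ∧ k.toList ≠ [] ∧
    ((k.toList.length : Int)) ∈ pvLengths := by decide

theorem pv_hit_fwd (low : String) (v : Int × String) (hv : some v ∈ pvHits low) :
    ∃ k, (k, v) ∈ pvKWitems ∧ PySem.Str.isIn k low = true := by
  rcases List.mem_map.mp hv with ⟨p, hp, hg⟩
  rcases List.mem_flatMap.mp hp with ⟨i, hi, hpL⟩
  rcases List.mem_map.mp hpL with ⟨L, hL, hpe⟩
  subst hpe
  have hi0 : 0 ≤ i := (PySem.List.mem_pyRange_one.mp hi).1
  have hL0 : 0 < L := pvLengths_pos L hL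
  refine ⟨PySem.Str.slice low (some i) (some (i + L)), pv_get?_mem _ _ _ hg, ?_⟩
  have hslice : (PySem.Str.slice low (some i) (some (i + L))).toList
      = List.take ((i + L).toNat - i.toNat) (List.drop i.toNat low.toList) := by
    rw [PySem.Str.toList_slice, PySem.Chars.slice_eq_listSlice,
      PySem.List.slice_toNat _ hi0 (by omega)]
  rw [PySem.Str.isIn_eq, hslice]
  exact (PySem.Chars.exists_prefix_drop_iff_isIn _ _).mp
    ⟨i.toNat, List.take_prefix _ _⟩

theorem pv_hit_back (low k : String) (v : Int × String) (hne : k.toList ≠ [])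
    (hL : ((k.toList.length : Int)) ∈ pvLengths) (hget : pvKW.get? k = some v)
    (hin : PySem.Str.isIn k low = true) : some v ∈ pvHits low := by
  rw [PySem.Str.isIn_eq] at hin
  rcases (PySem.Chars.exists_prefix_drop_iff_isIn _ _).mpr hin with ⟨j, hpre⟩
  have hjlt : j < low.toList.length := by
    by_contra hge
    rw [List.drop_eq_nil_iff.mpr (by omega)] at hpre
    exact hne (List.prefix_nil.mp hpre)
  refine List.mem_map.mpr ⟨((j : Int), (k.toList.length : Int)),
    List.mem_flatMap.mpr ⟨(j : Int), ?_, List.mem_map.mpr ⟨_, hL, rfl⟩⟩, ?_⟩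
  · exact PySem.List.mem_pyRange_one.mpr ⟨by positivity, by rw [PySem.Str.len_eq]; exact_mod_cast hjlt⟩
  · show pvKW.get? (PySem.Str.slice low (some (j : Int)) (some ((j : Int) + (k.toList.length : Int)))) = some v
    have hsl : PySem.Str.slice low (some (j : Int)) (some ((j : Int) + (k.toList.length : Int))) = k := by
      apply String.toList_inj.mp
      rw [PySem.Str.toList_slice, PySem.Chars.slice_eq_listSlice, PySem.List.slice_natCast_add]
      exact (List.prefix_iff_eq_take.mp hpre).symm
    rw [hsl]; exact hget

theorem pv_flag_of_hit (low : String) (v : Int × String) (hv : some v ∈ pvHits low) :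
    0 ≤ v.1 ∧ v.1 ≤ 6 ∧ v = (v.1, pvCat v.1) ∧ pvFlag low v.1 = true := by
  rcases pv_hit_fwd low v hv with ⟨k, hmem, hin⟩
  have hf := pv_entries_fact _ hmem
  exact ⟨hf.1.1, hf.1.2, Prod.ext rfl hf.2.1, List.any_eq_true.mpr ⟨k, hf.2.2.1, hin⟩⟩

theorem pv_hit_of_flag (low : String) (j : Int) (h0 : 0 ≤ j) (h6 : j ≤ 6)
    (hf : pvFlag low j = true) : some (j, pvCat j) ∈ pvHits low := by
  rcases List.any_eq_true.mp hf with ⟨k, hk, hin⟩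
  have hj : j ∈ ([0, 1, 2, 3, 4, 5, 6] : List Int) := by
    interval_cases j <;> decide
  have hfact := pv_kws_fact j hj k hk
  exact pv_hit_back low k _ hfact.2.1 hfact.2.2 hfact.1 hin

theorem pv_fold_char (low : String) (j : Int) (h0 : 0 ≤ j) (h6 : j ≤ 6)
    (hf : pvFlag low j = true)
    (hmin : ∀ j', 0 ≤ j' → j' < j → pvFlag low j' = false) :
    (pvHits low).foldl pvM none = some (j, pvCat j) := by
  rcases pv_fold_exists _ _ (pv_hit_of_flag low j h0 h6 hf) with ⟨v, he, hle⟩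
  rcases pv_flag_of_hit low v (pv_fold_mem _ _ he) with ⟨hv0, _, hveq, hvf⟩
  have : v.1 = j := by
    by_contra hne
    have hlt : v.1 < j := by simpa using lt_of_le_of_ne (by simpa using hle) hne
    rw [hmin v.1 hv0 hlt] at hvf
    exact Bool.noConfusion hvf
  rw [he, hveq, this]

theorem pv_fold_none (low : String)
    (hall : ∀ j', 0 ≤ j' → j' ≤ 6 → pvFlag low j' = false) :
    (pvHits low).foldl pvM none = none := by
  rw [pv_fold_none_iff]
  intro h hh
  rcases h with _ | v
  · rfl
  · rcases pv_flag_of_hit low v hh with ⟨hv0, hv6, _, hvf⟩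
    rw [hall v.1 hv0 hv6] at hvf
    exact Bool.noConfusion hvf

theorem pv_nest_eq (low : String) :
    (PySem.List.pyRange 0 (PySem.Str.len low) 1).foldl (fun best i =>
      pvLengths.foldl (fun best L =>
        match pvKW.get? (PySem.Str.slice low (some i) (some (i + L))) with
        | some hit => match best with
          | none => some hit
          | some b => if hit.1 < b.1 then some hit else some b
        | none => best) best) (none : Option (Int × String))
    = (pvHits low).foldl pvM none := by
  unfold pvHits pvPairs
  simp only [List.foldl_map, List.foldl_flatMap]
  apply List.foldl_ext
  intro best i _
  apply List.foldl_ext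
  intro b L _
  show _ = pvM b (pvG low (i, L))
  unfold pvG
  rcases pvKW.get? (PySem.Str.slice low (some i) (some (i + L))) with _ | hit
  · cases b <;> rfl
  · cases b <;> rfl

-- ===== VERDICT (by name: the statement is the Claim_ definition above) =====
set_option maxHeartbeats 1600000 in
theorem categorize_application_py_spec : Claim_equal_categorize_application_py := by
  intro app_name _
  unfold Spec_categorize_application_py categorize_application_py categorize_application_py_alt
  by_cases hemp : app_name = ""
  · rw [if_pos hemp, if_pos hemp]
  · rw [if_neg hemp, if_neg hemp]
    dsimp only
    set low := PySem.Str.lower app_name with hlow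
    rw [pv_nest_eq low]
    have e0 : pvFlag low 0 = ["visual studio", "eclipse", "intellij", "code", "git", "docker", "python", "node"].any (fun keyword => PySem.Str.isIn keyword low) := by norm_num [pvFlag, pvKws]
    have e1 : pvFlag low 1 = ["office", "word", "excel", "powerpoint", "outlook", "teams", "slack", "zoom"].any (fun keyword => PySem.Str.isIn keyword low) := by norm_num [pvFlag, pvKws]
    have e2 : pvFlag low 2 = ["chrome", "firefox", "edge", "safari", "browser"].any (fun keyword => PySem.Str.isIn keyword low) := by norm_num [pvFlag, pvKws]
    have e3 : pvFlag low 3 = ["photoshop", "illustrator", "vlc", "media", "video", "audio", "player"].any (fun keyword => PySem.Str.isIn keyword low) := by norm_num [pvFlag, pvKws]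
    have e4 : pvFlag low 4 = ["antivirus", "defender", "security", "firewall", "vpn"].any (fun keyword => PySem.Str.isIn keyword low) := by norm_num [pvFlag, pvKws]
    have e5 : pvFlag low 5 = ["driver", "utility", "update", "runtime", "redistributable", "framework"].any (fun keyword => PySem.Str.isIn keyword low) := by norm_num [pvFlag, pvKws]
    have e6 : pvFlag low 6 = ["game", "steam", "origin", "uplay"].any (fun keyword => PySem.Str.isIn keyword low) := by norm_num [pvFlag, pvKws]
    rw [← e0, ← e1, ← e2, ← e3, ← e4, ← e5, ← e6]
    clear e0 e1 e2 e3 e4 e5 e6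
    by_cases f0 : pvFlag low 0 = true
    · rw [if_pos f0]
      rw [pv_fold_char low 0 (by omega) (by omega) f0 (by intro j' a b; omega)]
      rfl
    have f0' : pvFlag low 0 = false := by simpa using f0
    rw [if_neg (by simp [f0'])]
    by_cases f1 : pvFlag low 1 = true
    · rw [if_pos f1]
      have hm1 : ∀ j', 0 ≤ j' → j' < 1 → pvFlag low j' = false := by
        intro j' a b
        have hj : j' = 0 := by omega
        exact hj ▸ f0'
      rw [pv_fold_char low 1 (by omega) (by omega) f1 hm1]
      rfl
    have f1' : pvFlag low 1 = false := by simpa using f1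
    rw [if_neg (by simp [f1'])]
    by_cases f2 : pvFlag low 2 = true
    · rw [if_pos f2]
      have hm2 : ∀ j', 0 ≤ j' → j' < 2 → pvFlag low j' = false := by
        intro j' a b
        have hj : j' = 0 ∨ j' = 1 := by omega
        rcases hj with rfl | rfl
        · exact f0'
        · exact f1'
      rw [pv_fold_char low 2 (by omega) (by omega) f2 hm2]
      rfl
    have f2' : pvFlag low 2 = false := by simpa using f2
    rw [if_neg (by simp [f2'])]
    by_cases f3 : pvFlag low 3 = true
    · rw [if_pos f3]
      have hm3 : ∀ j', 0 ≤ j' → j' < 3 → pvFlag low j' = false := by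
        intro j' a b
        have hj : j' = 0 ∨ j' = 1 ∨ j' = 2 := by omega
        rcases hj with rfl | rfl | rfl
        · exact f0'
        · exact f1'
        · exact f2'
      rw [pv_fold_char low 3 (by omega) (by omega) f3 hm3]
      rfl
    have f3' : pvFlag low 3 = false := by simpa using f3
    rw [if_neg (by simp [f3'])]
    by_cases f4 : pvFlag low 4 = true
    · rw [if_pos f4]
      have hm4 : ∀ j', 0 ≤ j' → j' < 4 → pvFlag low j' = false := by
        intro j' a b
        have hj : j' = 0 ∨ j' = 1 ∨ j' = 2 ∨ j' = 3 := by omega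
        rcases hj with rfl | rfl | rfl | rfl
        · exact f0'
        · exact f1'
        · exact f2'
        · exact f3'
      rw [pv_fold_char low 4 (by omega) (by omega) f4 hm4]
      rfl
    have f4' : pvFlag low 4 = false := by simpa using f4
    rw [if_neg (by simp [f4'])]
    by_cases f5 : pvFlag low 5 = true
    · rw [if_pos f5]
      have hm5 : ∀ j', 0 ≤ j' → j' < 5 → pvFlag low j' = false := by
        intro j' a b
        have hj : j' = 0 ∨ j' = 1 ∨ j' = 2 ∨ j' = 3 ∨ j' = 4 := by omega
        rcases hj with rfl | rfl | rfl | rfl | rfl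
        · exact f0'
        · exact f1'
        · exact f2'
        · exact f3'
        · exact f4'
      rw [pv_fold_char low 5 (by omega) (by omega) f5 hm5]
      rfl
    have f5' : pvFlag low 5 = false := by simpa using f5
    rw [if_neg (by simp [f5'])]
    by_cases f6 : pvFlag low 6 = true
    · rw [if_pos f6]
      have hm6 : ∀ j', 0 ≤ j' → j' < 6 → pvFlag low j' = false := by
        intro j' a b
        have hj : j' = 0 ∨ j' = 1 ∨ j' = 2 ∨ j' = 3 ∨ j' = 4 ∨ j' = 5 := by omega
        rcases hj with rfl | rfl | rfl | rfl | rfl | rfl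
        · exact f0'
        · exact f1'
        · exact f2'
        · exact f3'
        · exact f4'
        · exact f5'
      rw [pv_fold_char low 6 (by omega) (by omega) f6 hm6]
      rfl
    have f6' : pvFlag low 6 = false := by simpa using f6
    rw [if_neg (by simp [f6'])]
    have hall : ∀ j', 0 ≤ j' → j' ≤ 6 → pvFlag low j' = false := by
      intro j' a b
      have hj : j' = 0 ∨ j' = 1 ∨ j' = 2 ∨ j' = 3 ∨ j' = 4 ∨ j' = 5 ∨ j' = 6 := by omega
      rcases hj with rfl | rfl | rfl | rfl | rfl | rfl | rfl
      · exact f0'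
      · exact f1'
      · exact f2'
      · exact f3'
      · exact f4'
      · exact f5'
      · exact f6'
    rw [pv_fold_none low hall]
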